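-- pv_equiv track=rewrite | github.com/HU-Lee/problem-solving | LeetCode/Medium/0966-vowel-spellchecker/0966-vowel-spellchecker.py | spellchecker
-- ===== SOURCE A (Python) =====
-- from typing import List
--
-- def spellchecker(wordlist: List[str], queries: List[str]) -> List[str]:
--     ans = []
--     vowels = "aeiou"
--
--     # Preprocess to reduce time complexity
--     exact_set = set(wordlist)
--
--     lower_map = {}
--     for w in wordlist:
--         if w.lower() not in lower_map:
--             lower_map[w.lower()] = w
--
--     vowel_map = {}
--     for w in wordlist:
--         parsed_w = "".join("*" if c in vowels else c for c in w.lower())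
--         if parsed_w not in vowel_map:
--             vowel_map[parsed_w] = w
--
--     for q in queries:
--         # 1. Exact word
--         if q in wordlist:
--             ans.append(q)
--         elif q.lower() in lower_map:
--             ans.append(lower_map[q.lower()])
--         else:
--             parsed_q = "".join("*" if c in vowels else c for c in q.lower())
--             if parsed_q in vowel_map:
--                 ans.append(vowel_map[parsed_q])
--             else:
--                 ans.append("")
--
--     return ans
-- ===== SOURCE B (Python) =====
-- from typing import List
--
-- def devowel(w: str) -> str:
--     return "".join("*" if c in "aeiou" else c for c in w.lower())
--
-- def spellchecker(wordlist: List[str], queries: List[str]) -> List[str]: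
--     def answer(q: str) -> str:
--         if q in wordlist:
--             return q
--         ql = q.lower()
--         for w in wordlist:
--             if w.lower() == ql:
--                 return w
--         dq = devowel(q)
--         for w in wordlist:
--             if devowel(w) == dq:
--                 return w
--         return ""
--     return [answer(q) for q in queries]
-- ===== Notes on version B (the rewrite author's own statement) =====
-- stated objective: simpler
-- what changed: B drops A's three precomputed index structures (exact set, lowercase dict, devowel dict) and instead answers each query by direct first-match scans of wordlist for the lowercase and devowel tiers.
import Mathlib
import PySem

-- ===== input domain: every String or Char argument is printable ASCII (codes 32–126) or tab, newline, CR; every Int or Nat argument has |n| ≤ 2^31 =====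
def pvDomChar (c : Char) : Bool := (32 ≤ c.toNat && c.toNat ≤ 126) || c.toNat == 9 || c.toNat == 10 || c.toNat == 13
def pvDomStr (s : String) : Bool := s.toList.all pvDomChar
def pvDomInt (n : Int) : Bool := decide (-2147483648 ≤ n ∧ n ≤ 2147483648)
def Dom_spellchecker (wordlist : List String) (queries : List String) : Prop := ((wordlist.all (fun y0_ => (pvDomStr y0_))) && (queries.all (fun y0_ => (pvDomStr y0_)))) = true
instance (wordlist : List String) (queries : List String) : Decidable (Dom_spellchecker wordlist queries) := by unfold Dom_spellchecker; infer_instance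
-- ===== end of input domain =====

-- B replaces A's build-three-index-tables-then-lookup with per-query first-match scans of
-- wordlist (exact, then lowercase, then devowel tier); objective: simpler, same results.

-- ===== PORT A =====
-- literal transliteration of Source A; dict lookups m[k] guarded by 'k in m' are ported as
-- (m.get? k).getD "", exact under the guard.
def spellchecker (wordlist : List String) (queries : List String) : List String :=
  let vowels := "aeiou"
  let _exact_set := PySem.Set.ofList wordlist   -- built by A but never used
  let lower_map : PySem.Dict String String :=
    wordlist.foldl (fun m w =>
      if m.contains (PySem.Str.lower w) = false then m.insert (PySem.Str.lower w) w else m)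
      PySem.Dict.empty
  let vowel_map : PySem.Dict String String :=
    wordlist.foldl (fun m w =>
      let parsed_w := String.ofList ((PySem.Str.lower w).toList.map
        (fun c => if vowels.toList.contains c then '*' else c))
      if m.contains parsed_w = false then m.insert parsed_w w else m)
      PySem.Dict.empty
  queries.foldl (fun ans q =>
    if wordlist.contains q then ans ++ [q]
    else if lower_map.contains (PySem.Str.lower q) then
      ans ++ [(lower_map.get? (PySem.Str.lower q)).getD ""]
    else
      let parsed_q := String.ofList ((PySem.Str.lower q).toList.map
        (fun c => if vowels.toList.contains c then '*' else c))
      if vowel_map.contains parsed_q then ans ++ [(vowel_map.get? parsed_q).getD ""]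
      else ans ++ [""]) []

-- ===== PORT B =====
def devowel (w : String) : String :=
  String.ofList ((PySem.Str.lower w).toList.map
    (fun c => if ("aeiou" : String).toList.contains c then '*' else c))

def spellAnswer (wordlist : List String) (q : String) : String :=
  if wordlist.contains q then q
  else
    match wordlist.find? (fun w => PySem.Str.lower w == PySem.Str.lower q) with
    | some w => w
    | none =>
      match wordlist.find? (fun w => devowel w == devowel q) with
      | some w => w
      | none => ""

def spellchecker_alt (wordlist : List String) (queries : List String) : List String :=
  queries.map (spellAnswer wordlist)

-- ===== PRECONDITION & SPEC =====
def Spec_spellchecker (wordlist : List String) (queries : List String) (out : List String) : Prop := out = spellchecker_alt wordlist queries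
instance (wordlist : List String) (queries : List String) (out : List String) : Decidable (Spec_spellchecker wordlist queries out) := by unfold Spec_spellchecker; infer_instance

-- ===== CLAIM (what is proved, stated in full; the proofs are below) =====
def Claim_equal_spellchecker : Prop := ∀ (wordlist : List String) (queries : List String), Dom_spellchecker wordlist queries → Spec_spellchecker wordlist queries (spellchecker wordlist queries)

-- ===== LEMMAS AND PROOFS =====

-- a first-wins dict-building loop looks up as find? on the source list
theorem get?_foldl_firstwins (f : String → String) :
    ∀ (ws : List String) (d : PySem.Dict String String) (k : String),
      (ws.foldl (fun m w => if m.contains (f w) = false then m.insert (f w) w else m) d).get? k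
        = ((d.get? k).or (ws.find? (fun w => f w == k))) := by
  intro ws
  induction ws with
  | nil => intro d k; simp
  | cons w t ih =>
    intro d k
    simp only [List.foldl_cons, List.find?_cons, ih]
    by_cases hk : k = f w
    · subst hk
      by_cases hc : d.contains (f w) = false
      · have hd : d.get? (f w) = none := by
          rw [PySem.Dict.contains_eq_isSome_get?] at hc
          exact Option.not_isSome_iff_eq_none.mp (by simp [hc])
        simp [hc, hd, PySem.Dict.get?_insert_self]
      · have hs : (d.get? (f w)).isSome := by
          rw [← PySem.Dict.contains_eq_isSome_get?]; simpa using hc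
        obtain ⟨v, hv⟩ := Option.isSome_iff_exists.mp hs
        simp [hc, hv]
    · have hbk : (f w == k) = false := by
        simp only [beq_eq_false_iff_ne, ne_eq]; exact fun h => hk h.symm
      by_cases hc : d.contains (f w) = false
      · simp [hc, hbk, PySem.Dict.get?_insert_of_ne d w hk]
      · simp [hc, hbk]

theorem spellchecker_loop (wordlist : List String) :
    ∀ (qs : List String) (ans : List String),
      (qs.foldl (fun ans q =>
        if wordlist.contains q then ans ++ [q]
        else if (wordlist.foldl (fun m w =>
            if m.contains (PySem.Str.lower w) = false then m.insert (PySem.Str.lower w) w else m)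
            PySem.Dict.empty).contains (PySem.Str.lower q) then
          ans ++ [((wordlist.foldl (fun m w =>
            if m.contains (PySem.Str.lower w) = false then m.insert (PySem.Str.lower w) w else m)
            PySem.Dict.empty).get? (PySem.Str.lower q)).getD ""]
        else
          if (wordlist.foldl (fun m w =>
              if m.contains (devowel w) = false then m.insert (devowel w) w else m)
              PySem.Dict.empty).contains (devowel q) then
            ans ++ [((wordlist.foldl (fun m w =>
              if m.contains (devowel w) = false then m.insert (devowel w) w else m)
              PySem.Dict.empty).get? (devowel q)).getD ""]
          else ans ++ [""]) ans)
      = ans ++ qs.map (spellAnswer wordlist) := by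
  intro qs
  induction qs with
  | nil => intro ans; simp
  | cons q t ih =>
    intro ans
    rw [List.foldl_cons, List.map_cons, ih]
    have hL := get?_foldl_firstwins (fun w => PySem.Str.lower w) wordlist PySem.Dict.empty
      (PySem.Str.lower q)
    have hV := get?_foldl_firstwins (fun w => devowel w) wordlist PySem.Dict.empty (devowel q)
    simp only [PySem.Dict.get?_empty, Option.none_or] at hL hV
    by_cases hq : q ∈ wordlist
    · simp [spellAnswer, hq]
    · have hq' : wordlist.contains q = false := by simpa using hq
      simp only [hq', Bool.false_eq_true, if_false, spellAnswer]
      rw [PySem.Dict.contains_eq_isSome_get?, hL,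
          PySem.Dict.contains_eq_isSome_get?, hV]
      cases hfL : wordlist.find? (fun w => PySem.Str.lower w == PySem.Str.lower q) with
      | some w => simp
      | none =>
        simp only [Option.isSome_none, Bool.false_eq_true, if_false]
        cases hfV : wordlist.find? (fun w => devowel w == devowel q) with
        | some w => simp
        | none => simp

-- ===== VERDICT (by name: the statement is the Claim_ definition above) =====
theorem spellchecker_spec : Claim_equal_spellchecker := by
  intro wordlist queries _
  show spellchecker wordlist queries = spellchecker_alt wordlist queries
  unfold spellchecker spellchecker_alt
  exact (spellchecker_loop wordlist queries []).trans (by simp)
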